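-- pv_equiv track=rewrite | github.com/rafaelperazzo/programacao-web | moodledata/vpl_data/84/usersdata/251/51554/submittedfiles/lista1.py | impares
-- ===== SOURCE A (Python) =====
-- def impares (lista):
--     contI=0
--     soma=0
--     for i in range(0,len(lista),1):
--         if lista[i]%2!=0:
--             soma=soma+lista[i]
--             contI=contI+1
--     return(contI,soma)
-- ===== SOURCE B (Python) =====
-- def impares(lista):
--     # Branchless arithmetic: for any int x, x % 2 is 0 or 1 in Python,
--     # so x % 2 counts odds and x * (x % 2) keeps exactly the odd values.
--     count = sum(x % 2 for x in lista)
--     total = sum(x * (x % 2) for x in lista)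
--     return (count, total)
-- ===== Notes on version B (the rewrite author's own statement) =====
-- stated objective: alternative
-- what changed: B is branchless: it replaces A's index loop with a conditional on lista[i]%2 by two arithmetic reductions, using that x%2 is 0 or 1 in Python so the count is sum(x%2) and the odd-sum is sum(x*(x%2)), with no filtering or branching at all.
import Mathlib
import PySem

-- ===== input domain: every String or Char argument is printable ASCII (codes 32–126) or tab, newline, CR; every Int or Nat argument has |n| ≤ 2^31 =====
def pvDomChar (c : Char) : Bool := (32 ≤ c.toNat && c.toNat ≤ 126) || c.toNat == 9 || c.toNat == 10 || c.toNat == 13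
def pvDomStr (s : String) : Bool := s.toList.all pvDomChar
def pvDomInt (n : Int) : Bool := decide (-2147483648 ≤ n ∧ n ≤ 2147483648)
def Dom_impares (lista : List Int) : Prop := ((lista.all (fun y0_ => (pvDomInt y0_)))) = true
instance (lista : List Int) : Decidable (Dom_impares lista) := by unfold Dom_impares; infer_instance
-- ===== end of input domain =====

-- B is branchless: count = sum of x%2 and odd-sum = sum of x*(x%2), since Python's x%2 is 0 or 1 (objective: alternative).

-- ===== PORT A =====
-- index loop over range(0, len(lista), 1) with a branch and two accumulators
def impares (lista : List Int) : Int × Int :=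
  (PySem.List.pyRange 0 lista.length 1).foldl
    (fun (st : Int × Int) i =>
      if PySem.Int.mod (PySem.List.pyGetD lista i 0) 2 ≠ 0 then
        (st.1 + 1, st.2 + PySem.List.pyGetD lista i 0)
      else st)
    (0, 0)

-- ===== PORT B =====
-- two branchless arithmetic reductions over the list
def impares_alt (lista : List Int) : Int × Int :=
  ((lista.map (fun x => PySem.Int.mod x 2)).sum,
   (lista.map (fun x => x * PySem.Int.mod x 2)).sum)

-- ===== PRECONDITION & SPEC =====
def Spec_impares (lista : List Int) (out : Int × Int) : Prop := out = impares_alt lista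
instance (lista : List Int) (out : Int × Int) : Decidable (Spec_impares lista out) := by unfold Spec_impares; infer_instance

-- ===== CLAIM =====
def Claim_equal_impares : Prop := ∀ (lista : List Int), Dom_impares lista → Spec_impares lista (impares lista)

-- ===== LEMMAS AND PROOFS =====
theorem impares_fold_eq (lista : List Int) (c s : Int) :
    lista.foldl
      (fun (st : Int × Int) x =>
        if PySem.Int.mod x 2 ≠ 0 then (st.1 + 1, st.2 + x) else st) (c, s)
    = (c + (lista.map (fun x => PySem.Int.mod x 2)).sum,
       s + (lista.map (fun x => x * PySem.Int.mod x 2)).sum) := by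
  induction lista generalizing c s with
  | nil => simp
  | cons h t ih =>
    rw [List.foldl_cons]
    rcases PySem.Int.mod_two_eq h with h0 | h1
    · rw [if_neg (fun hc => hc h0), ih]
      simp only [List.map_cons, List.sum_cons, h0]
      refine Prod.ext ?_ ?_ <;> simp
    · rw [if_pos (h1 ▸ one_ne_zero), ih]
      simp only [List.map_cons, List.sum_cons, h1]
      refine Prod.ext ?_ ?_ <;> simp <;> ring

-- ===== VERDICT =====
theorem impares_spec : Claim_equal_impares := by
  intro lista _
  unfold Spec_impares impares impares_alt
  rw [PySem.List.foldl_pyRange_zero_pyGetD' lista 0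
    (fun (st : Int × Int) x =>
      if PySem.Int.mod x 2 ≠ 0 then (st.1 + 1, st.2 + x) else st) (0, 0),
    impares_fold_eq]
  simp
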